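-- pv_equiv track=rewrite | github.com/gruel/AphorismToTEI | hyppocratic/analysis.py | references
-- ===== SOURCE A (Python) =====
-- class AnalysisException(Exception):
--     """Class for exception
--     """
--     pass
--
-- def references(line):
--     """
--     This helper function searches a line of text for witness references
--     with the form ``[WW LL]`` and returns a string containing the original
--     text with each witness reference replaced with XML with the form
--     ``<locus target="WW">LL</locus>``.
--
--     ``\\n`` characters are added at the start and end of each XML insertion
--     so each instance of XML is on its own line.
--
--     It is intended this function is called by function main()
--     for each line of text from the main body of the text document before
--     processing footnote references using the _footnotes() function.
--
--     Parameters
--     ----------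
--
--     line : str
--         contains the line with the aphorism or the commentary to analyse.
--
--     Raises
--     ------
--     AnalysisException
--         if references does not follow the convention ``[W1 W2]``.
--         e.g. will raise an exception if:
--
--         - ``[W1W2]`` : missing space between the two witnesses
--
--         - ``[W1 W2`` : missing ``]``
--     """
--
--     # Create a string to contain the return value
--     result = ''
--
--     if not line:
--         return
--
--     while True:
--         # Try to partition this line at the first '[' character
--         text_before, sep, text_after = line.partition('[')
--
--         # Note: if sep is zero there are no more witnesses to add
--
--         # Add text_before to the result string
--         if text_before != '':
--             result += text_before
--             # If there is a witness to add start a new line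
--             if sep != '':
--                 result += '\n'
--
--         # If sep has zero length we can stop because there are no more
--         # witness _references
--         if sep == '':
--             break
--
--         # Try to split text_after at the first ']' character
--         reference, sep, line = text_after.partition(']')
--
--         # If this partition failed then something went wrong,
--         # so throw an error
--         if sep == '':
--             error = 'Unable to partition string {} at "]" ' \
--                     'when looking for a reference'.format(line)
--             logger.error(error)
--             raise AnalysisException
--
--         # Partition the reference into witness and location (these are
--         # separated by the ' ' character)
--         witness, sep, page = reference.partition(' ')
--
--         # If this partition failed there is an error
--         if sep == '':
--             error = ('Unable to partition reference [{}] '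
--                      'because missing space probably'.format(reference))
--             logger.error(error)
--             raise AnalysisException
--
--         # Add the witness and location XML to the result string
--         result += '<locus target="' + witness.strip() + \
--                   '">' + page.strip() + '</locus>'
--
--         # If text has zero length we can stop
--         if line == '':
--             break
--         else:
--             # There is more text to process so start a new line
--             result += '\n'
--
--     return result
-- ===== SOURCE B (Python) =====
-- class AnalysisException(Exception):
--     """Class for exception
--     """
--     pass
--
--
-- def references(line):
--     """Single char-by-char state-machine pass collecting pieces, joined with newlines."""
--     if not line:
--         return None
--     pieces = []
--     cur = []
--     in_ref = False
--     for ch in line: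
--         if in_ref:
--             if ch == ']':
--                 witness, sep, page = ''.join(cur).partition(' ')
--                 if not sep:
--                     raise AnalysisException
--                 pieces.append('<locus target="' + witness.strip() + '">'
--                               + page.strip() + '</locus>')
--                 cur = []
--                 in_ref = False
--             else:
--                 cur.append(ch)
--         elif ch == '[':
--             if cur:
--                 pieces.append(''.join(cur))
--                 cur = []
--             in_ref = True
--         else:
--             cur.append(ch)
--     if in_ref:
--         raise AnalysisException
--     if cur:
--         pieces.append(''.join(cur))
--     return '\n'.join(pieces)
-- ===== Notes on version B (the rewrite author's own statement) =====
-- stated objective: alternative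
-- what changed: A repeatedly re-partitions the remaining string at '[' and ']' and accumulates one result string with inline newline bookkeeping; B makes a single character-by-character state-machine pass (text/reference modes) collecting pieces into a list and joins them with newlines at the end.
import Mathlib
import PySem

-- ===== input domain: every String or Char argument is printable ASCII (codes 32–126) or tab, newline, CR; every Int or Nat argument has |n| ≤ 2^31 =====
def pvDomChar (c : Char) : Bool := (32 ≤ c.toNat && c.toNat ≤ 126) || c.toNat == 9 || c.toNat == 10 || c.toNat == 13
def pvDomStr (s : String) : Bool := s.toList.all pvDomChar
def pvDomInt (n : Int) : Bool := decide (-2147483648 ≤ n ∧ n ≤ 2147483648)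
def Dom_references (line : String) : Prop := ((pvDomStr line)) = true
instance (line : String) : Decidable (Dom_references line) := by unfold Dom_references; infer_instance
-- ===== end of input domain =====

-- B replaces A's repeated str.partition loop and inline-newline string accumulator by a single
-- char-by-char state-machine pass collecting pieces that are joined with '\n' at the end (objective:
-- alternative decomposition, same cost).

-- str.partition(c) for a single-character separator c, exact:
-- returns (before, sep-found?, after); Python's (before, sep, after) with sep rendered as a Bool.
def pypart (c : Char) (l : List Char) : List Char × Bool × List Char :=
  match l.dropWhile (· ≠ c) with
  | [] => (l, false, [])
  | _ :: rest => (l.takeWhile (· ≠ c), true, rest)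

-- '<locus target="' + witness.strip() + '">' + page.strip() + '</locus>' (identical literal in A and B)
def locusXML (w p : List Char) : List Char :=
  "<locus target=\"".toList ++ PySem.Chars.strip w ++ "\">".toList ++
    PySem.Chars.strip p ++ "</locus>".toList

theorem pypart_true_len {c : Char} {l b r : List Char} (h : pypart c l = (b, true, r)) :
    r.length < l.length := by
  unfold pypart at h
  split at h
  · simp at h
  · rename_i x t heq
    simp only [Prod.mk.injEq] at h
    obtain ⟨-, -, rfl⟩ := h
    have h1 : (x :: t).length ≤ l.length := heq ▸ List.length_dropWhile_le _ l
    simpa using Nat.lt_of_lt_of_le (Nat.lt_succ_self _) h1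

-- ===== PORT A =====
-- A's while-True loop; Python's `raise AnalysisException` is rendered as `none`
-- (those inputs are excluded by Pre_references).
def loopA (result : List Char) (line : List Char) : Option (List Char) :=
  match h1 : pypart '[' line with
  | (before, false, _) => some (if before ≠ [] then result ++ before else result)
  | (before, true, after) =>
    let result1 := if before ≠ [] then result ++ before ++ ['\n'] else result
    match h2 : pypart ']' after with
    | (_, false, _) => none
    | (ref, true, rest) =>
      match pypart ' ' ref with
      | (_, false, _) => none
      | (w, true, p) =>
        let result2 := result1 ++ locusXML w p
        if rest = [] then some result2
        else loopA (result2 ++ ['\n']) rest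
termination_by line.length
decreasing_by
  exact Nat.lt_trans (pypart_true_len h2) (pypart_true_len h1)

def references (line : String) : Option String :=
  if line = "" then none
  else (loopA [] line.toList).map String.ofList

-- ===== PORT B =====
-- B's for-loop over the characters with state (in_ref, cur, pieces); raise ↦ none.
def refsB (l : List Char) (inRef : Bool) (cur : List Char) (pieces : List (List Char)) :
    Option (List (List Char)) :=
  match l with
  | [] =>
    if inRef then none
    else if cur ≠ [] then some (pieces ++ [cur]) else some pieces
  | ch :: rest =>
    if inRef then
      if ch = ']' then
        match pypart ' ' cur with
        | (_, false, _) => none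
        | (w, true, p) => refsB rest false [] (pieces ++ [locusXML w p])
      else refsB rest true (cur ++ [ch]) pieces
    else if ch = '[' then
      refsB rest true [] (if cur ≠ [] then pieces ++ [cur] else pieces)
    else refsB rest false (cur ++ [ch]) pieces

def references_alt (line : String) : Option String :=
  if line = "" then none
  else (refsB line.toList false [] []).map (fun ps => String.ofList (PySem.Chars.join ['\n'] ps))

-- ===== PRECONDITION & SPEC =====
-- Pre_ excludes exactly the inputs on which A raises: some opening bracket is never closed
-- by a later closing bracket, or no space occurs inside a bracketed reference.
-- wfRefs scans the characters with two flags: "inside a bracketed reference" and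
-- "a space was seen inside the current reference".
def wfRefs (l : List Char) (inRef seenSpace : Bool) : Bool :=
  match l with
  | [] => !inRef
  | c :: rest =>
    if inRef then
      if c = ']' then seenSpace && wfRefs rest false false
      else wfRefs rest true (seenSpace || c = ' ')
    else if c = '[' then wfRefs rest true false
    else wfRefs rest false false

def Pre_references (line : String) : Prop := wfRefs line.toList false false = true
instance (line : String) : Decidable (Pre_references line) := by unfold Pre_references; infer_instance
def pvWitness_references : String := "ab [A 1] cd"

def Spec_references (line : String) (out : Option String) : Prop := out = references_alt line
instance (line : String) (out : Option String) : Decidable (Spec_references line out) := by unfold Spec_references; infer_instance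

-- ===== CLAIM (what is proved, stated in full; the proofs are below) =====
def Claim_equal_references : Prop := ∀ (line : String), Dom_references line → Pre_references line → Spec_references line (references line)

-- ===== LEMMAS AND PROOFS =====

theorem pypart_false {c : Char} {l b r : List Char} (h : pypart c l = (b, false, r)) :
    b = l ∧ c ∉ l := by
  unfold pypart at h
  split at h
  · rename_i heq
    rw [List.dropWhile_eq_nil_iff] at heq
    simp only [Prod.mk.injEq] at h
    obtain ⟨rfl, -, -⟩ := h
    exact ⟨rfl, fun hm => by simpa using heq c hm⟩
  · simp at h

theorem pypart_true {c : Char} {l b r : List Char} (h : pypart c l = (b, true, r)) :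
    l = b ++ c :: r ∧ c ∉ b := by
  unfold pypart at h
  split at h
  · simp at h
  · rename_i x t heq
    simp only [Prod.mk.injEq] at h
    obtain ⟨rfl, -, rfl⟩ := h
    have hx : (fun y => (y ≠ c : Bool)) x = false := by
      have := List.head?_dropWhile_not (fun y => (y ≠ c : Bool)) l
      rw [heq] at this; simpa using this
    have hx2 : x = c := by simpa using hx
    subst hx2
    refine ⟨?_, fun hm => by simpa using List.mem_takeWhile_imp hm⟩
    conv_lhs => rw [← List.takeWhile_append_dropWhile (p := fun y => (y ≠ x : Bool)) (l := l)]
    rw [heq]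

-- pieces is a pure accumulator of refsB
theorem refsB_acc (l : List Char) : ∀ (b : Bool) (cur : List Char) (pieces : List (List Char)),
    refsB l b cur pieces = (refsB l b cur []).map (pieces ++ ·) := by
  induction l with
  | nil =>
    intro b cur pieces
    cases b <;> by_cases hc : cur = [] <;> simp [refsB, hc]
  | cons ch rest ih =>
    intro b cur pieces
    rw [refsB, refsB]
    cases b with
    | true =>
      by_cases hch : ch = ']'
      · rcases hp : pypart ' ' cur with ⟨w, f, p⟩
        cases f
        · simp [hch, hp]
        · simp [hch, hp]
          rw [ih false [] (pieces ++ [locusXML w p]), ih false [] [locusXML w p]]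
          cases refsB rest false [] [] <;> simp
      · simp [hch]
        rw [ih]
    | false =>
      by_cases hch : ch = '['
      · by_cases hc : cur = []
        · simp [hch, hc]
          rw [ih]
        · simp [hch, hc]
          rw [ih true [] (pieces ++ [cur]), ih true [] [cur]]
          cases refsB rest true [] [] <;> simp
      · simp [hch]
        rw [ih]

-- text mode consumes a '['-free chunk into cur
theorem refsB_text (t : List Char) : ∀ (rest cur : List Char) (pieces : List (List Char)),
    '[' ∉ t → refsB (t ++ rest) false cur pieces = refsB rest false (cur ++ t) pieces := by
  induction t with
  | nil => intro rest cur pieces _; simp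
  | cons c t' ih =>
    intro rest cur pieces h
    have hc : c ≠ '[' := fun he => h (he ▸ List.mem_cons_self ..)
    rw [List.cons_append, refsB]
    simp only [if_neg hc, ite_false, Bool.false_eq_true, if_false]
    rw [ih rest (cur ++ [c]) pieces (fun hm => h (List.mem_cons_of_mem _ hm))]
    simp [List.append_assoc]

-- ref mode consumes a ']'-free chunk into cur
theorem refsB_ref (t : List Char) : ∀ (rest cur : List Char) (pieces : List (List Char)),
    ']' ∉ t → refsB (t ++ rest) true cur pieces = refsB rest true (cur ++ t) pieces := by
  induction t with
  | nil => intro rest cur pieces _; simp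
  | cons c t' ih =>
    intro rest cur pieces h
    have hc : c ≠ ']' := fun he => h (he ▸ List.mem_cons_self ..)
    rw [List.cons_append, refsB]
    simp only [if_neg hc, ite_true, if_pos]
    rw [ih rest (cur ++ [c]) pieces (fun hm => h (List.mem_cons_of_mem _ hm))]
    simp [List.append_assoc]

-- a successful run adds at least one piece when there is input (or pending state) left
theorem refsB_len (l : List Char) : ∀ (b : Bool) (cur : List Char)
    (pieces ps : List (List Char)), refsB l b cur pieces = some ps →
    pieces.length ≤ ps.length ∧ ((b = true ∨ l ≠ [] ∨ cur ≠ []) → pieces.length < ps.length) := by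
  induction l with
  | nil =>
    intro b cur pieces ps h
    cases b
    · by_cases hc : cur = []
      · simp [refsB, hc] at h
        refine ⟨by simp [← h], ?_⟩
        rintro (h' | h' | h') <;> simp_all
      · simp [refsB, hc] at h
        refine ⟨?_, fun _ => ?_⟩ <;> rw [← h] <;> simp
    · simp [refsB] at h
  | cons ch rest ih =>
    intro b cur pieces ps h
    rw [refsB] at h
    cases b with
    | true =>
      by_cases hch : ch = ']'
      · rcases hp : pypart ' ' cur with ⟨w, f, p⟩
        cases f
        · simp [hch, hp] at h
        · simp only [hch, hp, if_pos rfl, ite_true] at h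
          have := (ih false [] (pieces ++ [locusXML w p]) ps h).1
          simp at this
          exact ⟨by omega, fun _ => by omega⟩
      · simp only [if_neg hch, ite_true, if_pos] at h
        have := (ih true (cur ++ [ch]) pieces ps h).2 (Or.inl rfl)
        exact ⟨Nat.le_of_lt this, fun _ => this⟩
    | false =>
      by_cases hch : ch = '['
      · simp only [hch, ite_true, ite_false, Bool.false_eq_true, if_false] at h
        by_cases hc : cur = []
        · rw [if_neg (by simp [hc])] at h
          have := (ih true [] pieces ps h).2 (Or.inl rfl)
          exact ⟨Nat.le_of_lt this, fun _ => this⟩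
        · rw [if_pos (by simp [hc])] at h
          have := (ih true [] (pieces ++ [cur]) ps h).1
          simp at this
          exact ⟨by omega, fun _ => by omega⟩
      · simp only [hch, ite_false, Bool.false_eq_true, if_false] at h
        have := (ih false (cur ++ [ch]) pieces ps h).2 (Or.inr (Or.inr (by simp)))
        exact ⟨Nat.le_of_lt this, fun _ => this⟩

theorem refsB_ne_nil {l : List Char} {ps : List (List Char)}
    (hl : l ≠ []) (h : refsB l false [] [] = some ps) : ps ≠ [] := by
  have := (refsB_len l false [] [] ps h).2 (Or.inr (Or.inl hl))
  intro hps; rw [hps] at this; simp at this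

-- unfolding lemmas for loopA's dependent matches
theorem loopA_unfold1 {line before r : List Char} (result : List Char)
    (h1 : pypart '[' line = (before, false, r)) :
    loopA result line = some (if before ≠ [] then result ++ before else result) := by
  rw [loopA]
  repeat' split
  all_goals simp_all

theorem loopA_unfold2 {line before after ref r : List Char} (result : List Char)
    (h1 : pypart '[' line = (before, true, after))
    (h2 : pypart ']' after = (ref, false, r)) :
    loopA result line = none := by
  rw [loopA]
  repeat' split
  all_goals simp_all

theorem loopA_unfold3 {line before after ref rest w p : List Char} (result : List Char)
    (h1 : pypart '[' line = (before, true, after))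
    (h2 : pypart ']' after = (ref, true, rest))
    (h3 : pypart ' ' ref = (w, false, p)) :
    loopA result line = none := by
  rw [loopA]
  repeat' split
  all_goals simp_all

theorem loopA_unfold4 {line before after ref rest w p : List Char} (result : List Char)
    (h1 : pypart '[' line = (before, true, after))
    (h2 : pypart ']' after = (ref, true, rest))
    (h3 : pypart ' ' ref = (w, true, p)) :
    loopA result line =
      (if rest = []
       then some ((if before ≠ [] then result ++ before ++ ['\n'] else result) ++ locusXML w p)
       else loopA ((if before ≠ [] then result ++ before ++ ['\n'] else result)
                     ++ locusXML w p ++ ['\n']) rest) := by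
  rw [loopA]
  repeat' split
  all_goals simp_all

theorem refsB_open (before t : List Char) (hnb : '[' ∉ before) :
    refsB (before ++ '[' :: t) false [] [] =
      refsB t true [] (if before ≠ [] then [before] else []) := by
  rw [refsB_text before _ [] [] hnb, refsB]
  simp

-- B consumes 'ref ++ ]' and closes the reference
theorem refsB_close (ref rest : List Char) (P : List (List Char)) (hnr : ']' ∉ ref) :
    refsB (ref ++ ']' :: rest) true [] P =
      (match pypart ' ' ref with
       | (_, false, _) => none
       | (w, true, p) => refsB rest false [] (P ++ [locusXML w p])) := by
  rw [refsB_ref ref _ [] P hnr, refsB]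
  simp

theorem refsB_close_found (ref rest : List Char) (P : List (List Char)) (w p : List Char)
    (hnr : ']' ∉ ref) (h3 : pypart ' ' ref = (w, true, p)) :
    refsB (ref ++ ']' :: rest) true [] P = refsB rest false [] (P ++ [locusXML w p]) := by
  rw [refsB_close ref rest P hnr, h3]

theorem main_loop (result : List Char) (line : List Char) :
    loopA result line =
      (refsB line false [] []).map (fun qs => result ++ PySem.Chars.join ['\n'] qs) := by
  induction result, line using loopA.induct with
  | case1 result line before r h1 =>
    obtain ⟨hbl, hnotin⟩ := pypart_false h1
    rw [loopA_unfold1 result h1]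
    subst hbl
    by_cases hl : before = []
    · subst hl; simp [refsB, PySem.Chars.join_nil]
    · have ht := refsB_text before [] [] [] hnotin
      rw [List.append_nil] at ht
      rw [ht]
      simp [refsB, hl, PySem.Chars.join_singleton]
  | case2 result line before after h1 ref r h2 =>
    obtain ⟨hline, hnb⟩ := pypart_true h1
    obtain ⟨hra, hnr⟩ := pypart_false h2
    rw [loopA_unfold2 result h1 h2, hline, refsB_open before after hnb]
    have hr := refsB_ref after [] [] (if before ≠ [] then [before] else []) hnr
    rw [List.append_nil] at hr
    rw [hr]
    simp [refsB]
  | case3 result line before after h1 ref rest h2 w p h3 =>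
    obtain ⟨hline, hnb⟩ := pypart_true h1
    obtain ⟨hafter, hnr⟩ := pypart_true h2
    rw [loopA_unfold3 result h1 h2 h3, hline, hafter,
        refsB_open before _ hnb, refsB_close ref rest _ hnr, h3]
    simp
  | case4 result line before after h1 ref w p h3 h2 =>
    obtain ⟨hline, hnb⟩ := pypart_true h1
    obtain ⟨hafter, hnr⟩ := pypart_true h2
    rw [loopA_unfold4 result h1 h2 h3, hline, hafter,
        refsB_open before _ hnb, refsB_close ref [] _ hnr, h3]
    simp only [ite_true, if_pos, refsB]
    by_cases hb : before = []
    · simp [hb, PySem.Chars.join_singleton]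
    · simp [hb, PySem.Chars.join_cons_cons, PySem.Chars.join_singleton, List.append_assoc]
  | case5 result line before after h1 _res1 ref rest h2 w p h3 _res2 hrest ih =>
    obtain ⟨hline, hnb⟩ := pypart_true h1
    obtain ⟨hafter, hnr⟩ := pypart_true h2
    rw [loopA_unfold4 result h1 h2 h3, if_neg hrest]
    simp only [_res2, _res1] at ih
    simp only [dite_eq_ite] at ih
    rw [ih, hline, hafter, refsB_open before _ hnb,
        refsB_close_found ref rest _ w p hnr h3,
        refsB_acc rest false [] ((if before ≠ [] then [before] else []) ++ [locusXML w p])]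
    rcases hre : refsB rest false [] [] with _ | qs
    · simp
    · have hq := refsB_ne_nil hrest hre
      rcases qs with _ | ⟨q, qs'⟩
      · exact absurd rfl hq
      · by_cases hb : before = [] <;>
          simp [hb, PySem.Chars.join_cons_cons, List.append_assoc]

-- ===== VERDICT (by name: the statement is the Claim_ definition above) =====
theorem references_spec : Claim_equal_references := by
  intro line _ _
  unfold Spec_references references references_alt
  by_cases h : line = ""
  · simp [h]
  · simp only [h, ite_false, main_loop]
    cases refsB line.toList false [] [] <;> simp
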